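-- pv_equiv track=rewrite | github.com/Ananyakr93/Zomathon | src/agents/cold_start_agent.py | _infer_meal_from_hour
-- ===== SOURCE A (Python) =====
-- _MEAL_TIME_WINDOWS = {
--     "breakfast":      (6, 11),
--     "lunch":          (11, 15),
--     "evening_snacks": (15, 19),
--     "dinner":         (19, 23),
--     "late_night":     (23, 6),
-- }
--
-- def _infer_meal_from_hour(hour: int) -> str:
--     for meal, (start, end) in _MEAL_TIME_WINDOWS.items():
--         if start < end:
--             if start <= hour < end:
--                 return meal
--         else:
--             if hour >= start or hour < end:
--                 return meal
--     return "lunch"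
-- ===== SOURCE B (Python) =====
-- _BOUNDS = (6, 11, 15, 19, 23)
-- _LABELS = ("late_night", "breakfast", "lunch", "evening_snacks", "dinner", "late_night")
--
-- def _infer_meal_from_hour(hour: int) -> str:
--     # rank of hour among the window boundaries selects the label directly
--     idx = 0
--     for b in _BOUNDS:
--         if b <= hour:
--             idx += 1
--     return _LABELS[idx]
-- ===== Notes on version B (the rewrite author's own statement) =====
-- stated objective: alternative
-- what changed: Replaces the per-window range checks (with a wrap-around branch) by computing the rank of hour among the sorted boundaries 6,11,15,19,23 and indexing a label array with it; the two sentinel late_night entries at the ends absorb all out-of-range hours.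
import Mathlib
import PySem

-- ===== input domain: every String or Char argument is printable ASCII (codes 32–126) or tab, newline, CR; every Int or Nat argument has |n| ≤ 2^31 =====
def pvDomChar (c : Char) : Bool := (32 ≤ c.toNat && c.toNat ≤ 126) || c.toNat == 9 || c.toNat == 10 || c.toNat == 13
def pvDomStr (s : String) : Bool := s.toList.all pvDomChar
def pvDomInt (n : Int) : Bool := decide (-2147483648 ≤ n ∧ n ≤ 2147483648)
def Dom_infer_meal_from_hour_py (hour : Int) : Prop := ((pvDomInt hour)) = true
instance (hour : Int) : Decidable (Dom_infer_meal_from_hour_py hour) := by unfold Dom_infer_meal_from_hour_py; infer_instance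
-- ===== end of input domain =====

-- B replaces A's window-by-window scan by ranking hour among the sorted boundaries and indexing a label array (objective: alternative).


-- ===== PORT A =====
-- A: loop over the meal-window association list, with the wrap-around branch
def pvMealWindows : List (String × Int × Int) :=
  [("breakfast", 6, 11), ("lunch", 11, 15), ("evening_snacks", 15, 19),
   ("dinner", 19, 23), ("late_night", 23, 6)]

def pvMealLoop (hour : Int) : List (String × Int × Int) → String
  | [] => "lunch"
  | (meal, start, stop) :: rest =>
    if start < stop then
      if start ≤ hour ∧ hour < stop then meal else pvMealLoop hour rest
    else
      if hour ≥ start ∨ hour < stop then meal else pvMealLoop hour rest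

def infer_meal_from_hour_py (hour : Int) : String := pvMealLoop hour pvMealWindows

-- ===== PORT B =====
-- B: idx = rank of hour among the boundaries; the label list is indexed by it
def pvBounds : List Int := [6, 11, 15, 19, 23]
def pvLabels : List String :=
  ["late_night", "breakfast", "lunch", "evening_snacks", "dinner", "late_night"]

def infer_meal_from_hour_py_alt (hour : Int) : String :=
  let idx := pvBounds.foldl (fun acc b => if b ≤ hour then acc + 1 else acc) 0
  pvLabels.getD idx ""   -- _LABELS[idx]; idx is always in range 0..5

-- ===== PRECONDITION & SPEC =====
def Spec_infer_meal_from_hour_py (hour : Int) (out : String) : Prop := out = infer_meal_from_hour_py_alt hour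
instance (hour : Int) (out : String) : Decidable (Spec_infer_meal_from_hour_py hour out) := by unfold Spec_infer_meal_from_hour_py; infer_instance

-- ===== CLAIM (what is proved, stated in full; the proofs are below) =====
def Claim_equal_infer_meal_from_hour_py : Prop := ∀ (hour : Int), Dom_infer_meal_from_hour_py hour → Spec_infer_meal_from_hour_py hour (infer_meal_from_hour_py hour)

-- ===== LEMMAS AND PROOFS =====

-- ===== VERDICT (by name: the statement is the Claim_ definition above) =====
theorem infer_meal_from_hour_py_spec : Claim_equal_infer_meal_from_hour_py := by
  intro hour _
  unfold Spec_infer_meal_from_hour_py infer_meal_from_hour_py infer_meal_from_hour_py_alt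
    pvMealWindows pvBounds pvLabels
  simp only [pvMealLoop, List.foldl]
  have hc : hour < 6 ∨ (6 ≤ hour ∧ hour < 11) ∨ (11 ≤ hour ∧ hour < 15) ∨
      (15 ≤ hour ∧ hour < 19) ∨ (19 ≤ hour ∧ hour < 23) ∨ 23 ≤ hour := by omega
  rcases hc with h | h | h | h | h | h
  · rw [if_pos (by decide : (6:Int) < 11),
      if_neg (by omega : ¬((6:Int) ≤ hour ∧ hour < 11)),
      if_pos (by decide : (11:Int) < 15),
      if_neg (by omega : ¬((11:Int) ≤ hour ∧ hour < 15)),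
      if_pos (by decide : (15:Int) < 19),
      if_neg (by omega : ¬((15:Int) ≤ hour ∧ hour < 19)),
      if_pos (by decide : (19:Int) < 23),
      if_neg (by omega : ¬((19:Int) ≤ hour ∧ hour < 23)),
      if_neg (by decide : ¬((23:Int) < 6)),
      if_pos (by omega : hour ≥ 23 ∨ hour < 6),
      if_neg (by omega : ¬((6:Int) ≤ hour)),
      if_neg (by omega : ¬((11:Int) ≤ hour)),
      if_neg (by omega : ¬((15:Int) ≤ hour)),
      if_neg (by omega : ¬((19:Int) ≤ hour)),
      if_neg (by omega : ¬((23:Int) ≤ hour))]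
    decide
  · rw [if_pos (by decide : (6:Int) < 11),
      if_pos (by omega : (6:Int) ≤ hour ∧ hour < 11),
      if_pos (by omega : (6:Int) ≤ hour),
      if_neg (by omega : ¬((11:Int) ≤ hour)),
      if_neg (by omega : ¬((15:Int) ≤ hour)),
      if_neg (by omega : ¬((19:Int) ≤ hour)),
      if_neg (by omega : ¬((23:Int) ≤ hour))]
    decide
  · rw [if_pos (by decide : (6:Int) < 11),
      if_neg (by omega : ¬((6:Int) ≤ hour ∧ hour < 11)),
      if_pos (by decide : (11:Int) < 15),
      if_pos (by omega : (11:Int) ≤ hour ∧ hour < 15),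
      if_pos (by omega : (6:Int) ≤ hour),
      if_pos (by omega : (11:Int) ≤ hour),
      if_neg (by omega : ¬((15:Int) ≤ hour)),
      if_neg (by omega : ¬((19:Int) ≤ hour)),
      if_neg (by omega : ¬((23:Int) ≤ hour))]
    decide
  · rw [if_pos (by decide : (6:Int) < 11),
      if_neg (by omega : ¬((6:Int) ≤ hour ∧ hour < 11)),
      if_pos (by decide : (11:Int) < 15),
      if_neg (by omega : ¬((11:Int) ≤ hour ∧ hour < 15)),
      if_pos (by decide : (15:Int) < 19),
      if_pos (by omega : (15:Int) ≤ hour ∧ hour < 19),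
      if_pos (by omega : (6:Int) ≤ hour),
      if_pos (by omega : (11:Int) ≤ hour),
      if_pos (by omega : (15:Int) ≤ hour),
      if_neg (by omega : ¬((19:Int) ≤ hour)),
      if_neg (by omega : ¬((23:Int) ≤ hour))]
    decide
  · rw [if_pos (by decide : (6:Int) < 11),
      if_neg (by omega : ¬((6:Int) ≤ hour ∧ hour < 11)),
      if_pos (by decide : (11:Int) < 15),
      if_neg (by omega : ¬((11:Int) ≤ hour ∧ hour < 15)),
      if_pos (by decide : (15:Int) < 19),
      if_neg (by omega : ¬((15:Int) ≤ hour ∧ hour < 19)),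
      if_pos (by decide : (19:Int) < 23),
      if_pos (by omega : (19:Int) ≤ hour ∧ hour < 23),
      if_pos (by omega : (6:Int) ≤ hour),
      if_pos (by omega : (11:Int) ≤ hour),
      if_pos (by omega : (15:Int) ≤ hour),
      if_pos (by omega : (19:Int) ≤ hour),
      if_neg (by omega : ¬((23:Int) ≤ hour))]
    decide
  · rw [if_pos (by decide : (6:Int) < 11),
      if_neg (by omega : ¬((6:Int) ≤ hour ∧ hour < 11)),
      if_pos (by decide : (11:Int) < 15),
      if_neg (by omega : ¬((11:Int) ≤ hour ∧ hour < 15)),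
      if_pos (by decide : (15:Int) < 19),
      if_neg (by omega : ¬((15:Int) ≤ hour ∧ hour < 19)),
      if_pos (by decide : (19:Int) < 23),
      if_neg (by omega : ¬((19:Int) ≤ hour ∧ hour < 23)),
      if_neg (by decide : ¬((23:Int) < 6)),
      if_pos (by omega : hour ≥ 23 ∨ hour < 6),
      if_pos (by omega : (6:Int) ≤ hour),
      if_pos (by omega : (11:Int) ≤ hour),
      if_pos (by omega : (15:Int) ≤ hour),
      if_pos (by omega : (19:Int) ≤ hour),
      if_pos (by omega : (23:Int) ≤ hour)]
    decide
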